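-- pv_equiv track=rewrite | github.com/subrotonpi/clone_evaluation | data/gptcb_cross/gptcb_cross/None/1811.py | zeroFront
-- ===== SOURCE A (Python) =====
-- def zeroFront(nums):
--   if nums is None:
--     return None
--
--   result = [0] * len(nums)
--   zeroPos, otherPos = 0, len(nums)-1
--
--   for i in range(len(nums)):
--     if nums[i] == 0:
--       result[zeroPos] = 0
--       zeroPos += 1
--     else:
--       result[otherPos] = nums[i]
--       otherPos -= 1
--
--   return result
-- ===== SOURCE B (Python) =====
-- def zeroFront(nums):
--     if nums is None:
--         return None
--     nonzeros = [x for x in nums if x != 0]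
--     return [0] * (len(nums) - len(nonzeros)) + nonzeros[::-1]
-- ===== Notes on version B (the rewrite author's own statement) =====
-- stated objective: simpler
-- what changed: Replaces A's pre-allocated array written via two cursors from both ends with a single filter: collect the non-zero elements, then prepend the right number of zeros to their reversal.
import Mathlib
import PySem

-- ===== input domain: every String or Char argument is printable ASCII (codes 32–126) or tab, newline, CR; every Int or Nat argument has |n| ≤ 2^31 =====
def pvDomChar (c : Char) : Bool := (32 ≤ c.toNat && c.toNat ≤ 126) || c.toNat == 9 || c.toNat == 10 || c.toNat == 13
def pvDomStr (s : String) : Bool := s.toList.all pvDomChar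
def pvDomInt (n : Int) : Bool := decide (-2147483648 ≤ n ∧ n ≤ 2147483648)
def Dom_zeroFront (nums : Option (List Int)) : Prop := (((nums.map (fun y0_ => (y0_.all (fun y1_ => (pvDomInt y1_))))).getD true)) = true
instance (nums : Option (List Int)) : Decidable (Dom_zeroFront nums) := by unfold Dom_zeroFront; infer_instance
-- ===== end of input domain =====

-- B replaces A's pre-allocated array written from both ends with a single filter:
-- [0] * zeroCount ++ reverse of the non-zero elements (objective: simpler).

-- ===== PORT A =====
-- loop body: result[zeroPos] = 0 / result[otherPos] = nums[i]; state (result, zeroPos, otherPos)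
def zeroFrontStep (st : List Int × Int × Int) (x : Int) : List Int × Int × Int :=
  if x == 0 then (PySem.List.pySetD st.1 st.2.1 0, st.2.1 + 1, st.2.2)
  else (PySem.List.pySetD st.1 st.2.2 x, st.2.1, st.2.2 - 1)

def zeroFront (nums : Option (List Int)) : Option (List Int) :=
  match nums with
  | none => none
  | some ns =>
    -- 'for i in range(len(nums)): … nums[i] …' visits exactly the elements of ns in order
    let st := ns.foldl zeroFrontStep (List.replicate ns.length (0 : Int), 0, (ns.length : Int) - 1)
    some st.1

-- ===== PORT B =====
def zeroFront_alt (nums : Option (List Int)) : Option (List Int) :=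
  match nums with
  | none => none
  | some ns =>
    let nonzeros := ns.filter (fun x => x != 0)
    some (List.replicate (ns.length - nonzeros.length) 0 ++ nonzeros.reverse)

-- ===== PRECONDITION & SPEC =====
def Spec_zeroFront (nums : Option (List Int)) (out : Option (List Int)) : Prop := out = zeroFront_alt nums
instance (nums : Option (List Int)) (out : Option (List Int)) : Decidable (Spec_zeroFront nums out) := by unfold Spec_zeroFront; infer_instance

-- ===== CLAIM (what is proved, stated in full; the proofs are below) =====
def Claim_equal_zeroFront : Prop := ∀ (nums : Option (List Int)), Dom_zeroFront nums → Spec_zeroFront nums (zeroFront nums)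

-- ===== LEMMAS AND PROOFS =====

lemma set_last_replicate_append (m : Nat) (x : Int) (acc : List Int) :
    (List.replicate (m + 1) (0 : Int) ++ acc).set m x
      = List.replicate m (0 : Int) ++ x :: acc := by
  have h : List.replicate (m + 1) (0 : Int) ++ acc
      = List.replicate m (0 : Int) ++ (0 :: acc) := by
    simp [List.replicate_succ']
  rw [h, List.set_append_right m x (by simp)]
  simp

lemma zeroFront_loop (ns : List Int) : ∀ (z : Nat) (acc : List Int),
    ns.foldl zeroFrontStep
        (List.replicate (z + ns.length) (0 : Int) ++ acc, (z : Int), (z : Int) + ns.length - 1)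
      = (List.replicate (z + (ns.filter (fun x => x == 0)).length) (0 : Int)
            ++ (ns.filter (fun x => x != 0)).reverse ++ acc,
         ((z + (ns.filter (fun x => x == 0)).length : Nat) : Int),
         (z : Int) + (ns.filter (fun x => x == 0)).length - 1) := by
  induction ns with
  | nil => intro z acc; simp
  | cons x t ih =>
    intro z acc
    by_cases hx : x = 0
    · subst hx
      have f1 : List.filter (fun x => x == (0 : Int)) (0 :: t)
          = 0 :: List.filter (fun x => x == (0 : Int)) t := by simp
      have f2 : List.filter (fun x => x != (0 : Int)) (0 :: t)
          = List.filter (fun x => x != (0 : Int)) t := by simp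
      simp only [List.foldl_cons, List.length_cons, zeroFrontStep, f1, f2]
      norm_num
      rw [show ((z : Int) + 1) = ((z + 1 : Nat) : Int) from by push_cast; ring,
          show ((z : Int) + ((t.length : Int) + 1) - 1)
              = ((z + 1 : Nat) : Int) + (t.length : Int) - 1 from by push_cast; ring]
      rw [show z + (t.length + 1) = (z + 1) + t.length from by omega]
      rw [ih (z + 1) acc]
      refine congrArg₂ Prod.mk ?_ (congrArg₂ Prod.mk ?_ ?_)
      · rw [List.append_assoc]
        congr 2
        omega
      · push_cast; ring
      · push_cast; ring
    · have hb : (x == (0 : Int)) = false := by simpa using hx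
      have hb' : (x != (0 : Int)) = true := by simpa using hx
      have f1 : List.filter (fun y => y == (0 : Int)) (x :: t)
          = List.filter (fun y => y == (0 : Int)) t := by simp [hb]
      have f2 : List.filter (fun y => y != (0 : Int)) (x :: t)
          = x :: List.filter (fun y => y != (0 : Int)) t := by simp [hb']
      have hset : PySem.List.pySetD
          (List.replicate (z + (t.length + 1)) (0 : Int) ++ acc) ((z + t.length : Nat) : Int) x
          = List.replicate (z + t.length) (0 : Int) ++ x :: acc := by
        rw [PySem.List.pySetD_natCast]
        rw [show z + (t.length + 1) = (z + t.length) + 1 from by omega]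
        exact set_last_replicate_append _ _ _
      simp only [List.foldl_cons, List.length_cons, zeroFrontStep, f1, f2, hb,
        Bool.false_eq_true, if_false]
      rw [show ((z : Int) + ((t.length + 1 : Nat) : Int) - 1)
            = ((z + t.length : Nat) : Int) from by push_cast; ring]
      rw [hset]
      rw [show (((z + t.length : Nat) : Int) - 1) = (z : Int) + (t.length : Int) - 1 from by
        push_cast; ring]
      rw [ih z (x :: acc)]
      refine congrArg₂ Prod.mk ?_ (congrArg₂ Prod.mk ?_ ?_)
      · simp [List.append_assoc]
      · rfl
      · rfl

lemma length_filter_split (ns : List Int) :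
    (ns.filter (fun x => x == 0)).length + (ns.filter (fun x => x != 0)).length = ns.length := by
  induction ns with
  | nil => simp
  | cons x t ih =>
    by_cases hx : x = 0
    · subst hx; simp; omega
    · have hb : (x == (0 : Int)) = false := by simpa using hx
      have hb' : (x != (0 : Int)) = true := by simpa using hx
      simp [hb, hb']; omega

-- ===== VERDICT (by name: the statement is the Claim_ definition above) =====
theorem zeroFront_spec : Claim_equal_zeroFront := by
  intro nums _
  unfold Spec_zeroFront zeroFront zeroFront_alt
  match nums with
  | none => rfl
  | some ns =>
    simp only
    have hstart : (List.replicate ns.length (0 : Int), (0 : Int), (ns.length : Int) - 1)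
        = (List.replicate (0 + ns.length) (0 : Int) ++ [], ((0 : Nat) : Int),
           ((0 : Nat) : Int) + (ns.length : Int) - 1) := by simp
    rw [hstart, zeroFront_loop ns 0 []]
    have hlen := length_filter_split ns
    simp only [List.append_nil]
    rw [show (List.filter (fun x => x == (0 : Int)) ns).length
          = ns.length - (List.filter (fun x => x != (0 : Int)) ns).length from by omega,
        Nat.zero_add]
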